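-- pv_equiv track=rewrite | github.com/robocomp/robocomp | tools/robocompdsl/dsl_parsers/parsing_utils.py | get_name_number
-- ===== SOURCE A (Python) =====
-- from collections import Counter, OrderedDict
--
-- def get_name_number(names_list):
--     """
--     Used add a number in case of multiple equal names
--     :param names_list: list of names
--     :return:
--     """
--     assert isinstance(names_list, list), "names_list must be a 'list' of names (str) not %s" % str(type(names_list))
--     for name in names_list:
--         assert isinstance(name, str), "names must be a 'str' not %s" % str(type(name))
--     ret = []
--     c = Counter(names_list)
--     keys = sorted(c)
--
--     for k in keys:
--         for cont in range(c[k]):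
--             if cont > 0:
--                 ret.append([k, str(cont)])
--             else:
--                 ret.append([k, ''])
--     return ret
-- ===== SOURCE B (Python) =====
-- def get_name_number(names_list):
--     """
--     Used add a number in case of multiple equal names
--     :param names_list: list of names
--     :return:
--     """
--     assert isinstance(names_list, list), "names_list must be a 'list' of names (str) not %s" % str(type(names_list))
--     for name in names_list:
--         assert isinstance(name, str), "names must be a 'str' not %s" % str(type(name))
--     ret = []
--     prev = None
--     idx = 0
--     for name in sorted(names_list):
--         if name != prev:
--             idx = 0
--         ret.append([name, '' if idx == 0 else str(idx)])
--         prev = name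
--         idx += 1
--     return ret
-- ===== Notes on version B (the rewrite author's own statement) =====
-- stated objective: simpler
-- what changed: Replaces the Counter-of-names plus nested range loop by sorting the whole list once and a single run-length scan that tracks the previous name and a running duplicate index.
import Mathlib
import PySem

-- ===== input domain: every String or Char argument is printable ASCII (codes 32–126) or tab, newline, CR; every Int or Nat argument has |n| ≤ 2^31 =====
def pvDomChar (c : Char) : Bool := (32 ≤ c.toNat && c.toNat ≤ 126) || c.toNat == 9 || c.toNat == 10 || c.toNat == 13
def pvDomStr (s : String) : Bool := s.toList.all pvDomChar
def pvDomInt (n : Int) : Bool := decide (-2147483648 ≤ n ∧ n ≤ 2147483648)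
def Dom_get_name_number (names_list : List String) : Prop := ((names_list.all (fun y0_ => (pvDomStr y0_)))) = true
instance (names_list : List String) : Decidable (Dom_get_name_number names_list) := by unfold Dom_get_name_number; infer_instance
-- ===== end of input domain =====

-- B sorts the whole list once and emits suffixes in a single run-length scan, instead of A's Counter plus nested range loop (simpler decomposition, same cost).


-- ===== PORT A =====
def get_name_number (names_list : List String) : List (List String) :=
  let ret : List (List String) := []
  let c := PySem.Dict.counter names_list
  let keys := PySem.List.sorted c.keys (fun x => x) false
  keys.foldl (fun ret k =>
    (PySem.List.pyRange 0 (c.getD k 0) 1).foldl (fun ret cont =>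
      if cont > 0 then ret ++ [[k, PySem.Int.toStr cont]]
      else ret ++ [[k, ""]]) ret) ret

-- ===== PORT B =====
def get_name_number_alt (names_list : List String) : List (List String) :=
  (((PySem.List.sorted names_list (fun x => x) false).foldl
    (fun (st : List (List String) × Option String × Int) name =>
      let ret := st.1
      let prev := st.2.1
      let idx := if some name ≠ prev then 0 else st.2.2
      (ret ++ [[name, if idx = 0 then "" else PySem.Int.toStr idx]], some name, idx + 1))
    ([], none, 0))).1

-- ===== PRECONDITION & SPEC =====
def Spec_get_name_number (names_list : List String) (out : List (List String)) : Prop := out = get_name_number_alt names_list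
instance (names_list : List String) (out : List (List String)) : Decidable (Spec_get_name_number names_list out) := by unfold Spec_get_name_number; infer_instance

-- ===== CLAIM (what is proved, stated in full; the proofs are below) =====
def Claim_equal_get_name_number : Prop := ∀ (names_list : List String), Dom_get_name_number names_list → Spec_get_name_number names_list (get_name_number names_list)

-- ===== LEMMAS AND PROOFS =====

def gB (st : List (List String) × Option String × Int) (name : String) : List (List String) × Option String × Int :=
  let ret := st.1
  let prev := st.2.1
  let idx := if some name ≠ prev then 0 else st.2.2
  (ret ++ [[name, if idx = 0 then "" else PySem.Int.toStr idx]], some name, idx + 1)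

theorem scan_replicate (k : String) : ∀ (m : Nat) (ret : List (List String)) (i : Int),
    (List.replicate m k).foldl gB (ret, some k, i)
      = (ret ++ (PySem.List.pyRange i (i + m) 1).map (fun j => [k, if j = 0 then "" else PySem.Int.toStr j]), some k, i + m) := by
  intro m
  induction m with
  | zero => intro ret i; simp
  | succ m ih =>
    intro ret i
    have hlt : i < i + (m + 1 : Nat) := by push_cast; omega
    rw [List.replicate_succ, List.foldl_cons,
      show gB (ret, some k, i) k = (ret ++ [[k, if i = 0 then "" else PySem.Int.toStr i]], some k, i + 1) by simp [gB],
      ih, PySem.List.pyRange_one_cons hlt, List.map_cons,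
      show i + ((m+1:Nat):Int) = (i+1) + (m:Nat) by push_cast; ring, List.append_assoc]
    rfl

theorem filter_or_perm (l : List String) (p q : String → Bool) (h : ∀ x, ¬(p x = true ∧ q x = true)) :
    (l.filter (fun x => p x || q x)).Perm (l.filter p ++ l.filter q) := by
  induction l with
  | nil => simp
  | cons x xs ih =>
    by_cases hp : p x = true
    · have : ¬ q x = true := fun hq => h x ⟨hp, hq⟩
      simp [hp, this]; exact ih
    · by_cases hq : q x = true
      · simp [hp, hq]; exact (ih.cons x).trans (List.perm_middle.symm)
      · simp [hp, hq]; exact ih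

theorem flatMap_replicate_perm (l : List String) : ∀ (ks : List String), ks.Nodup →
    (ks.flatMap fun k => List.replicate (l.count k) k).Perm (l.filter (fun x => decide (x ∈ ks))) := by
  intro ks
  induction ks with
  | nil => simp
  | cons k ks ih =>
    intro hnd
    rw [List.nodup_cons] at hnd
    have h2 := ih hnd.2
    have hfe : l.filter (fun x => decide (x ∈ k :: ks)) = l.filter (fun x => (x == k) || decide (x ∈ ks)) := by
      apply List.filter_congr; intro x _; by_cases hxk : x = k <;> simp [hxk, List.mem_cons]
    rw [List.flatMap_cons, hfe]
    have hrep : List.replicate (l.count k) k = l.filter (· == k) := by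
      simpa using (List.filter_beq (l := l) (a := k)).symm
    rw [hrep]
    refine ((List.Perm.append_left _ h2).trans ?_).symm.symm
    exact (filter_or_perm l (· == k) (fun x => decide (x ∈ ks))
      (fun x ⟨h1, h2'⟩ => hnd.1 (by simp at h1 h2'; rwa [← h1]))).symm

theorem pairwise_le_flatMap (n : String → Nat) : ∀ ks : List String, ks.Pairwise (· < ·) →
    (ks.flatMap fun k => List.replicate (n k) k).Pairwise (· ≤ ·) := by
  intro ks
  induction ks with
  | nil => simp
  | cons k ks ih =>
    intro h
    rw [List.pairwise_cons] at h
    rw [List.flatMap_cons, List.pairwise_append]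
    refine ⟨List.pairwise_replicate.mpr (Or.inr le_rfl), ih h.2, ?_⟩
    intro a ha b hb
    rw [List.eq_of_mem_replicate ha]
    obtain ⟨k', hk', hb'⟩ := List.mem_flatMap.mp hb
    rw [List.eq_of_mem_replicate hb']
    exact le_of_lt (h.1 k' hk')

def cntKeys (l : List String) : List String := PySem.List.sorted (PySem.Set.ofList l) (fun x => x) false

theorem cntKeys_nodup (l : List String) : (cntKeys l).Nodup :=
  (PySem.List.sorted_perm (PySem.Set.ofList l) (fun x => x) false).symm.nodup (PySem.Set.nodup_ofList l)

theorem mem_cntKeys (l : List String) (x : String) : x ∈ cntKeys l ↔ x ∈ l := by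
  unfold cntKeys
  exact (PySem.List.mem_sorted (PySem.Set.ofList l) (fun x => x) false x).trans (PySem.Set.mem_ofList l x)

theorem sorted_eq_flatMap (l : List String) :
    PySem.List.sorted l (fun x => x) false
      = (cntKeys l).flatMap (fun k => List.replicate (l.count k) k) := by
  apply PySem.List.sorted_id_eq_of_perm_of_pairwise
  · have hperm := flatMap_replicate_perm l (cntKeys l) (cntKeys_nodup l)
    have hf : l.filter (fun x => decide (x ∈ cntKeys l)) = l :=
      List.filter_eq_self.mpr (fun x hx => by simp [mem_cntKeys, hx])
    rwa [hf] at hperm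
  · exact pairwise_le_flatMap _ _ (PySem.List.sorted_ofList_pairwise_lt l)

theorem scan_flatMap (cnt : String → Nat) : ∀ (ks : List String), ks.Pairwise (· < ·) →
    ∀ (ret : List (List String)) (prev : Option String) (i : Int),
    (∀ k ∈ ks, 1 ≤ cnt k) → (∀ k ∈ ks, prev ≠ some k) →
    ((ks.flatMap fun k => List.replicate (cnt k) k).foldl gB (ret, prev, i)).1
      = ret ++ ks.flatMap (fun k => (PySem.List.pyRange 0 (cnt k) 1).map
          (fun j => [k, if j = 0 then "" else PySem.Int.toStr j])) := by
  intro ks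
  induction ks with
  | nil => simp
  | cons k ks ih =>
    intro hp ret prev i h1 h2
    rw [List.pairwise_cons] at hp
    obtain ⟨m, hm⟩ : ∃ m, cnt k = m + 1 := ⟨cnt k - 1, by have := h1 k (by simp); omega⟩
    have hne : some k ≠ prev := fun h => (h2 k (by simp)) h.symm
    rw [List.flatMap_cons, List.foldl_append, hm, List.replicate_succ, List.foldl_cons,
      show gB (ret, prev, i) k = (ret ++ [[k, ""]], some k, (0:Int) + 1) by simp [gB, hne],
      show (0:Int) + 1 = 1 by ring, scan_replicate,
      ih hp.2 _ _ _ (fun k' hk' => h1 k' (by simp [hk']))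
        (fun k' hk' hc => (hp.1 k' hk').ne (Option.some.inj hc))]
    have hgrp : ([[k, ""]] : List (List String)) ++ (PySem.List.pyRange 1 (1 + (m:Int)) 1).map
          (fun j => [k, if j = 0 then "" else PySem.Int.toStr j])
        = (PySem.List.pyRange 0 ((m+1 : Nat) : Int) 1).map
          (fun j => [k, if j = 0 then "" else PySem.Int.toStr j]) := by
      rw [show ((m+1:Nat):Int) = 1 + (m:Int) by push_cast; ring,
        PySem.List.pyRange_one_cons (by omega : (0:Int) < 1 + (m:Int))]
      simp
    rw [List.flatMap_cons, hm, ← hgrp]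
    simp [List.append_assoc]

theorem inner_foldl (k : String) (js : List Int) (ret : List (List String)) :
    js.foldl (fun ret cont => if cont > 0 then ret ++ [[k, PySem.Int.toStr cont]] else ret ++ [[k, ""]]) ret
      = ret ++ js.map (fun cont => [k, if cont > 0 then PySem.Int.toStr cont else ""]) := by
  rw [show (fun (ret : List (List String)) cont =>
        if cont > 0 then ret ++ [[k, PySem.Int.toStr cont]] else ret ++ [[k, ""]])
      = fun ret cont => ret ++ [[k, if cont > 0 then PySem.Int.toStr cont else ""]] by
    funext r c; by_cases h : c > 0 <;> simp [h]]
  exact PySem.List.foldl_append_singleton_eq_map _ js ret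

theorem A_fold (l : List String) : ∀ (ks : List String) (ret : List (List String)),
    ks.foldl (fun ret k => (PySem.List.pyRange 0 ((PySem.Dict.counter l).getD k 0) 1).foldl
      (fun ret cont => if cont > 0 then ret ++ [[k, PySem.Int.toStr cont]] else ret ++ [[k, ""]]) ret) ret
    = ret ++ ks.flatMap (fun k => (PySem.List.pyRange 0 ((l.count k : Nat) : Int) 1).map
        (fun cont => [k, if cont > 0 then PySem.Int.toStr cont else ""])) := by
  intro ks
  induction ks with
  | nil => simp
  | cons k ks ih =>
    intro ret
    rw [List.foldl_cons, PySem.Dict.getD_counter, inner_foldl, ih, List.flatMap_cons,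
      List.append_assoc]

theorem A_char (l : List String) :
    get_name_number l = (cntKeys l).flatMap (fun k =>
      (PySem.List.pyRange 0 ((l.count k : Nat) : Int) 1).map
        (fun cont => [k, if cont > 0 then PySem.Int.toStr cont else ""])) := by
  show (PySem.List.sorted (PySem.Dict.counter l).keys (fun x => x) false).foldl _ [] = _
  rw [PySem.Dict.keys_counter]
  exact A_fold l (cntKeys l) []

theorem group_map_congr (l : List String) :
    ((cntKeys l).flatMap (fun k => (PySem.List.pyRange 0 ((l.count k : Nat) : Int) 1).map
        (fun cont => [k, if cont > 0 then PySem.Int.toStr cont else ""])))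
    = (cntKeys l).flatMap (fun k => (PySem.List.pyRange 0 ((l.count k : Nat) : Int) 1).map
        (fun j => [k, if j = 0 then "" else PySem.Int.toStr j])) := by
  rw [List.flatMap_def, List.flatMap_def]
  apply congrArg
  apply List.map_congr_left
  intro k _
  apply List.map_congr_left
  intro j hj
  have hj0 : 0 ≤ j := (PySem.List.mem_pyRange_one.mp hj).1
  by_cases h : j = 0
  · simp [h]
  · have : j > 0 := lt_of_le_of_ne hj0 (Ne.symm h)
    simp [h, this]

theorem AB (l : List String) : get_name_number l = get_name_number_alt l := by
  rw [A_char, group_map_congr]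
  show _ = (((PySem.List.sorted l (fun x => x) false).foldl gB ([], none, 0))).1
  rw [sorted_eq_flatMap,
    scan_flatMap (fun k => l.count k) (cntKeys l)
      (PySem.List.sorted_ofList_pairwise_lt l) [] none 0
      (fun k hk => List.count_pos_iff.mpr ((mem_cntKeys l k).mp hk))
      (fun k _ => by simp),
    List.nil_append]

-- ===== VERDICT (by name: the statement is the Claim_ definition above) =====
theorem get_name_number_spec : Claim_equal_get_name_number := by
  intro names_list _
  show get_name_number names_list = get_name_number_alt names_list
  exact AB names_list
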